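-- pv_equiv track=rewrite | github.com/cforth/toys | combinations/enumerations_generater.py | enumerations_generater
-- ===== SOURCE A (Python) =====
-- def enumerations_generater(elements, length):
--     """对有N个元素的列表，取X次（可取重复的元素）。生成全部的组合情况。
--        参数： elements ：有N个元素的列表。
--              length ：取元素的次数，也就是生成的组合的长度。
--        结果： 一个组合生成器，使用for循环进行迭代，给出所有组合。
--     """
--     result = [None for n in range(length)]
--     base = len(elements)
--     for num in range(base ** length):
--         for index in range(length):
--             result[length - index - 1] = elements[num % base]
--             num = num // base
--         yield result
-- ===== SOURCE B (Python) =====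
-- def enumerations_generater(elements, length):
--     """Odometer generator: yields a shared row buffer, advancing it like a
--     counter and touching only the digits that change on each step."""
--     if length == 0:
--         yield []
--         return
--     base = len(elements)
--     if base == 0:
--         return
--     digits = [0] * length
--     row = [elements[0]] * length
--     while True:
--         yield row
--         i = length - 1
--         while i >= 0 and digits[i] == base - 1:
--             i -= 1
--         if i < 0:
--             return
--         digits[i] += 1
--         row[i] = elements[digits[i]]
--         for j in range(i + 1, length):
--             digits[j] = 0
--             row[j] = elements[0]
-- ===== Notes on version B (the rewrite author's own statement) =====
-- stated objective: alternative
-- what changed: A recomputes every digit of the mixed-radix counter from the item number with length divmods per yield; B is an incremental odometer that carries the digit vector and the row buffer and touches only the digits that change on each step. Pre_ excludes negative length, on which A raises (TypeError/ZeroDivisionError from base**length). Equivalence is about the value a consumer collecting the generator observes (both yield a shared row buffer).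
import Mathlib
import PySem

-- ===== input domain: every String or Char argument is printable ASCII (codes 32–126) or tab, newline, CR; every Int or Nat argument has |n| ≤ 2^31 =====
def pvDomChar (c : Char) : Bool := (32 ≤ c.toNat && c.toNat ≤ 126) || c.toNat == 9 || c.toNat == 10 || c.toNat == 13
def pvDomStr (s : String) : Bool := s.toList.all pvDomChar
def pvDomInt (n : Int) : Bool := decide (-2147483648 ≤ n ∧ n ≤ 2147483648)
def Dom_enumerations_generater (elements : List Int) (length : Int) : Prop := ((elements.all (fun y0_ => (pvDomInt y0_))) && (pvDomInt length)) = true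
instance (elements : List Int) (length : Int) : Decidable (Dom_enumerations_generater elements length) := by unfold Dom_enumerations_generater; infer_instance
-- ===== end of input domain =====

-- B replaces A's per-item recomputation of every counter digit from the item number by an
-- incremental odometer touching only the digits that change; both generators yield one shared row
-- buffer, so the equivalence proved is about the value a consumer collecting the generator observes.


-- ===== PORT A =====
-- inner loop 'for index in range(length): result[length-index-1] = elements[num % base]; num = num // base':
-- index is only a counter; the state is (num, suffix of the row written so far) — iteration index
-- writes cell length-1-index, i.e. prepends to the already-written suffix (pyGetD default 0 is never
-- hit: the body only runs when total > 0, i.e. base > 0, and then 0 ≤ num % base < base = len(elements)).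
def pvRowA (elements : List Int) (base : Int) (length : Int) (num : Int) : List Int :=
  ((PySem.List.pyRange 0 length 1).foldl
    (fun st _index =>
      (PySem.Int.floordiv st.1 base,
       PySem.List.pyGetD elements (PySem.Int.mod st.1 base) 0 :: st.2))
    (num, [])).2

-- 'yield result' hands out the SAME list object each time; consuming the generator with list()
-- observes base**length references to the loop's final state, modeled as List.replicate.
def enumerations_generater (elements : List Int) (length : Int) : List (List Int) :=
  let base : Int := (elements.length : Int)
  let total : Int := base ^ length.toNat
  -- result = [None for n in range(length)]; each outer iteration overwrites every cell,
  -- so the fold's state is replaced wholesale by pvRowA at each step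
  let final : List Int :=
    (PySem.List.pyRange 0 total 1).foldl
      (fun _result num => pvRowA elements base length num)
      (List.replicate length.toNat 0)
  List.replicate total.toNat final

-- ===== PORT B =====
-- Source B scans digits/row from the RIGHT; the port keeps the parallel lists (digits, row) as one
-- REVERSED list of (digit, cell) pairs, so the rightmost position is the head.  pvIncr is the
-- 'find rightmost incrementable digit, bump it, clear the suffix' step ('while i >= 0 and
-- digits[i] == base - 1 … digits[i] += 1; row[i] = elements[digits[i]]; for j …: digits[j] = 0;
-- row[j] = elements[0]'); none = the scan ran off the left end ('if i < 0: return'),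
-- leaving the state untouched.  Indexing elements[k] with 0 ≤ k < base is PySem.List.pyGetD.
def pvIncr (elements : List Int) (base : Nat) : List (Nat × Int) → Option (List (Nat × Int))
  | [] => none
  | (d, _c) :: rest =>
    if d + 1 < base then
      some ((d + 1, PySem.List.pyGetD elements ((d : Int) + 1) 0) :: rest)
    else
      match pvIncr elements base rest with
      | none => none
      | some rest' => some ((0, PySem.List.pyGetD elements 0 0) :: rest')

-- the 'while True: yield row; <increment or return>' loop; each iteration yields once, so the
-- result is (number of yields, final state).  fuel = base ^ length is exactly the number of
-- iterations the loop performs (a totality guard only; the proofs show it is never exhausted).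
def pvOdo (elements : List Int) (base : Nat) : Nat → List (Nat × Int) → Nat × List (Nat × Int)
  | 0, st => (0, st)
  | fuel + 1, st =>
    match pvIncr elements base st with
    | none => (1, st)
    | some st' =>
      let r := pvOdo elements base fuel st' 
      (r.1 + 1, r.2)

-- as for A, the collected value is (number of yields) references to the final shared row
def enumerations_generater_alt (elements : List Int) (length : Int) : List (List Int) :=
  if length = 0 then [[]]
  else
    let base := elements.length
    if base = 0 then []
    else
      let L := length.toNat
      let st0 : List (Nat × Int) := List.replicate L (0, PySem.List.pyGetD elements 0 0)
      let r := pvOdo elements base (base ^ L) st0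
      List.replicate r.1 ((r.2.map Prod.snd).reverse)

-- ===== PRECONDITION & SPEC =====
-- Pre_ excludes length < 0, where Python A raises (TypeError on range(float), or
-- ZeroDivisionError when elements is empty) and returns no value.
def Pre_enumerations_generater (_elements : List Int) (length : Int) : Prop := 0 ≤ length
instance (elements : List Int) (length : Int) : Decidable (Pre_enumerations_generater elements length) := by unfold Pre_enumerations_generater; infer_instance
def pvWitness_enumerations_generater : List Int × Int := ([1, 2], 2)

def Spec_enumerations_generater (elements : List Int) (length : Int) (out : List (List Int)) : Prop := out = enumerations_generater_alt elements length
instance (elements : List Int) (length : Int) (out : List (List Int)) : Decidable (Spec_enumerations_generater elements length out) := by unfold Spec_enumerations_generater; infer_instance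

-- ===== CLAIM (what is proved, stated in full; the proofs are below) =====
def Claim_equal_enumerations_generater : Prop := ∀ (elements : List Int) (length : Int), Dom_enumerations_generater elements length → Pre_enumerations_generater elements length → Spec_enumerations_generater elements length (enumerations_generater elements length)

-- ===== LEMMAS AND PROOFS =====

-- ---- A side ----

-- a fold whose step ignores the list element is an iterate of the step function
lemma foldl_ignore_elem {a b : Type} (l : List a) (f : b → b) (init : b) :
    l.foldl (fun st _ => f st) init = f^[l.length] init := by
  induction l generalizing init with
  | nil => rfl
  | cons x xs ih => simp [List.foldl_cons, ih, Function.iterate_succ_apply]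

-- at num = base^k - 1 every digit is base - 1, so the inner loop writes elements[base-1] everywhere
lemma pvRowA_step_top (elements : List Int) (b : Nat) (hb : 0 < b) :
    ∀ (k : Nat) (row : List Int),
      ((fun st : Int × List Int =>
          (PySem.Int.floordiv st.1 (b : Int),
           PySem.List.pyGetD elements (PySem.Int.mod st.1 (b : Int)) 0 :: st.2))^[k]
        ((b : Int) ^ k - 1, row)).2
      = List.replicate k (PySem.List.pyGetD elements ((b : Int) - 1) 0) ++ row := by
  intro k
  induction k with
  | zero => simp
  | succ k ih =>
      intro row
      have hbi : (0 : Int) < (b : Int) := by exact_mod_cast hb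
      have hexp : ((b : Int) ^ k - 1) * (b : Int) = (b : Int) ^ (k + 1) - (b : Int) := by ring
      have hexp2 : ((b : Int) ^ k - 1 + 1) * (b : Int) = (b : Int) ^ (k + 1) := by ring
      have hfd : PySem.Int.floordiv ((b : Int) ^ (k + 1) - 1) (b : Int) = (b : Int) ^ k - 1 := by
        rw [PySem.Int.floordiv_eq_iff_of_pos hbi, hexp, hexp2]
        omega
      have hmd : PySem.Int.mod ((b : Int) ^ (k + 1) - 1) (b : Int) = (b : Int) - 1 := by
        have := PySem.Int.floordiv_mul_add_mod ((b : Int) ^ (k + 1) - 1) (b : Int)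
        rw [hfd, hexp] at this
        omega
      rw [Function.iterate_succ_apply]
      simp only [hfd, hmd]
      rw [ih, List.append_cons, ← List.replicate_succ']

lemma pvRowA_top (elements : List Int) (b : Nat) (hb : 0 < b) (k : Nat) :
    pvRowA elements (b : Int) (k : Int) ((b : Int) ^ k - 1)
      = List.replicate k (PySem.List.pyGetD elements ((b : Int) - 1) 0) := by
  unfold pvRowA
  rw [foldl_ignore_elem, PySem.List.length_pyRange_one]
  have hk : ((k : Int) - 0).toNat = k := by omega
  rw [hk]
  simpa using pvRowA_step_top elements b hb k []

-- the outer fold ignores its accumulator, so only the last counter value matters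
lemma foldl_const_last {a : Type} (g : Int → a) (init : a) (x t : Int) (h : x < t) :
    (PySem.List.pyRange x t 1).foldl (fun _ num => g num) init = g (t - 1) := by
  have hsplit := PySem.List.pyRange_one_append x (t - 1) t (by omega) (by omega)
  have hlast : PySem.List.pyRange (t - 1) t 1 = [t - 1] := by
    have := PySem.List.pyRange_one_singleton (t - 1)
    simpa [show t - 1 + 1 = t by omega] using this
  rw [hsplit, hlast, List.foldl_append]
  simp

-- ---- B side ----

-- value of the reversed digit list (head = least significant)
def pvVal (base : Nat) : List Nat → Nat
  | [] => 0
  | d :: rest => d + base * pvVal base rest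

lemma pvVal_lt (base : Nat) (_hb : 1 ≤ base) :
    ∀ ds : List Nat, (∀ d ∈ ds, d < base) → pvVal base ds < base ^ ds.length := by
  intro ds
  induction ds with
  | nil => intro _; simp [pvVal]
  | cons d rest ih =>
      intro h
      have hd : d < base := h d (by simp)
      have hr : pvVal base rest < base ^ rest.length := ih (fun x hx => h x (by simp [hx]))
      have : base * (pvVal base rest + 1) ≤ base * base ^ rest.length :=
        Nat.mul_le_mul_left base hr
      simp only [pvVal, List.length_cons, pow_succ]
      nlinarith

lemma pvVal_top (base : Nat) (hb : 1 ≤ base) :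
    ∀ L : Nat, pvVal base (List.replicate L (base - 1)) + 1 = base ^ L := by
  intro L
  induction L with
  | zero => simp [pvVal]
  | succ L ih =>
      simp only [List.replicate_succ, pvVal]
      calc base - 1 + base * pvVal base (List.replicate L (base - 1)) + 1
          = base * pvVal base (List.replicate L (base - 1)) + (base - 1 + 1) := by ring
        _ = base * pvVal base (List.replicate L (base - 1)) + base := by omega
        _ = base * (pvVal base (List.replicate L (base - 1)) + 1) := by ring
        _ = base * base ^ L := by rw [ih]
        _ = base ^ (L + 1) := (pow_succ' base L).symm

lemma pvVal_zeros (base : Nat) : ∀ L : Nat, pvVal base (List.replicate L 0) = 0 := by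
  intro L
  induction L with
  | zero => rfl
  | succ L ih => simp [List.replicate_succ, pvVal, ih]

-- one odometer step: either every digit is base-1 and the scan fails (none, state untouched),
-- or the increment succeeds and the counter value grows by exactly one, preserving the invariant
lemma pvIncr_spec (elements : List Int) (base : Nat) (hb : 1 ≤ base) :
    ∀ st : List (Nat × Int),
      (∀ p ∈ st, p.1 < base ∧ p.2 = PySem.List.pyGetD elements (p.1 : Int) 0) →
      (pvIncr elements base st = none ∧ ∀ p ∈ st, p.1 = base - 1) ∨
      (∃ st', pvIncr elements base st = some st' ∧ st'.length = st.length ∧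
        (∀ p ∈ st', p.1 < base ∧ p.2 = PySem.List.pyGetD elements (p.1 : Int) 0) ∧
        pvVal base (st'.map Prod.fst) = pvVal base (st.map Prod.fst) + 1) := by
  intro st
  induction st with
  | nil => intro _; exact Or.inl ⟨rfl, by simp⟩
  | cons p rest ih =>
      intro h
      obtain ⟨d, c⟩ := p
      have hd : d < base := (h (d, c) (by simp)).1
      by_cases hlt : d + 1 < base
      · refine Or.inr ⟨(d + 1, PySem.List.pyGetD elements ((d : Int) + 1) 0) :: rest, ?_, by simp, ?_, ?_⟩
        · simp [pvIncr, hlt]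
        · intro q hq
          rcases List.mem_cons.1 hq with hq | hq
          · subst hq; refine ⟨hlt, ?_⟩; push_cast; ring_nf
          · exact h q (by simp [hq])
        · simp only [List.map_cons, pvVal]; ring
      · have hdeq : d = base - 1 := by omega
        rcases ih (fun q hq => h q (by simp [hq])) with ⟨hnone, htop⟩ | ⟨rest', hsome, hlen, hgood, hval⟩
        · refine Or.inl ⟨?_, ?_⟩
          · simp [pvIncr, hlt, hnone]
          · intro q hq
            rcases List.mem_cons.1 hq with hq | hq
            · subst hq; exact hdeq
            · exact htop q hq
        · refine Or.inr ⟨(0, PySem.List.pyGetD elements 0 0) :: rest', ?_, by simp [hlen], ?_, ?_⟩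
          · simp [pvIncr, hlt, hsome]
          · intro q hq
            rcases List.mem_cons.1 hq with hq | hq
            · subst hq; exact ⟨hb, by norm_num⟩
            · exact hgood q hq
          · simp only [List.map_cons, pvVal, hval, Nat.mul_add, Nat.mul_one, hdeq]
            generalize base * pvVal base (List.map Prod.fst rest) = w
            omega

-- the whole loop: started anywhere with k + value = base^length remaining iterations, it yields
-- exactly k times and stops with every digit at base-1 (the row cells follow the invariant)
lemma pvOdo_spec (elements : List Int) (base : Nat) (hb : 1 ≤ base) :
    ∀ (k : Nat) (st : List (Nat × Int)),
      (∀ p ∈ st, p.1 < base ∧ p.2 = PySem.List.pyGetD elements (p.1 : Int) 0) →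
      k + pvVal base (st.map Prod.fst) = base ^ st.length →
      pvOdo elements base k st
        = (k, List.replicate st.length (base - 1, PySem.List.pyGetD elements ((base : Int) - 1) 0)) := by
  intro k
  induction k with
  | zero =>
      intro st hgood hk
      exfalso
      have := pvVal_lt base hb (st.map Prod.fst) (by
        intro d hd
        rcases List.mem_map.1 hd with ⟨p, hp, rfl⟩
        exact (hgood p hp).1)
      simp only [List.length_map] at this
      omega
  | succ k ih =>
      intro st hgood hk
      rcases pvIncr_spec elements base hb st hgood with ⟨hnone, htop⟩ | ⟨st', hsome, hlen, hgood', hval⟩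
      · have hrep : st.map Prod.fst = List.replicate st.length (base - 1) := by
          have h := List.eq_replicate_of_mem (l := st.map Prod.fst) (a := base - 1) (by
            intro d hd
            rcases List.mem_map.1 hd with ⟨p, hp, rfl⟩
            exact htop p hp)
          rwa [List.length_map] at h
        have hvtop := pvVal_top base hb st.length
        rw [hrep] at hk
        have hk0 : k = 0 := by
          set X := pvVal base (List.replicate st.length (base - 1)) with hX
          set Y := base ^ st.length with hY
          omega
        subst hk0
        have hcast : ((base - 1 : Nat) : Int) = (base : Int) - 1 := by omega
        have hst : st = List.replicate st.length (base - 1, PySem.List.pyGetD elements ((base : Int) - 1) 0) := by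
          apply List.eq_replicate_of_mem
          intro p hp
          cases p with
          | mk d c =>
            have h1 : d = base - 1 := htop (d, c) hp
            have h2 : c = PySem.List.pyGetD elements (d : Int) 0 := (hgood (d, c) hp).2
            subst h1
            rw [Prod.mk.injEq]
            exact ⟨rfl, by rw [h2, hcast]⟩
        simp only [pvOdo, hnone]
        rw [Prod.ext_iff]
        exact ⟨by norm_num, hst⟩
      · have hk' : k + pvVal base (st'.map Prod.fst) = base ^ st'.length := by
          rw [hval, hlen]; omega
        have := ih st' hgood' hk'
        simp only [pvOdo, hsome, this, hlen]

-- ===== VERDICT (by name: the statement is the Claim_ definition above) =====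
theorem enumerations_generater_spec : Claim_equal_enumerations_generater := by
  intro elements length _hdom hpre
  unfold Spec_enumerations_generater enumerations_generater enumerations_generater_alt
  have hpre' : (0 : Int) ≤ length := hpre
  by_cases hL0 : length = 0
  · subst hL0
    simp only [Int.toNat_zero, pow_zero]
    have hr : PySem.List.pyRange (0 : Int) 1 1 = [0] := by decide
    rw [hr]
    simp [pvRowA, PySem.List.pyRange_one_eq_nil (le_refl (0 : Int))]
  · have hLpos : 0 < length := by omega
    set L : Nat := length.toNat with hLdef
    have hL1 : 1 ≤ L := by omega
    simp only [if_neg hL0]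
    by_cases hbase : elements.length = 0
    · have h0 : ((elements.length : Int)) ^ L = 0 := by
        rw [hbase]
        simp only [Nat.cast_zero]
        exact zero_pow (show L ≠ 0 by omega)
      rw [h0]
      simp [hbase]
    · have hb : 1 ≤ elements.length := by omega
      set b : Nat := elements.length with hbdef
      have hbi : (0 : Int) < (b : Int) := by exact_mod_cast hb
      have htot : (0 : Int) < (b : Int) ^ L := pow_pos hbi L
      -- A side
      rw [foldl_const_last _ _ 0 _ (by omega)]
      have hArow : pvRowA elements (b : Int) length ((b : Int) ^ L - 1)
          = List.replicate L (PySem.List.pyGetD elements ((b : Int) - 1) 0) := by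
        have := pvRowA_top elements b hb L
        rwa [show ((L : Int)) = length by omega] at this
      rw [hArow]
      -- B side
      have hst0 : ∀ p ∈ List.replicate L ((0 : Nat), PySem.List.pyGetD elements 0 0),
          p.1 < b ∧ p.2 = PySem.List.pyGetD elements (p.1 : Int) 0 := by
        intro p hp
        have := List.eq_of_mem_replicate hp
        subst this
        exact ⟨hb, by norm_num⟩
      have hk : b ^ L + pvVal b ((List.replicate L ((0 : Nat), PySem.List.pyGetD elements 0 0)).map Prod.fst)
          = b ^ (List.replicate L ((0 : Nat), PySem.List.pyGetD elements 0 0)).length := by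
        simp [List.map_replicate, pvVal_zeros]
      rw [if_neg hbase, pvOdo_spec elements b hb (b ^ L) _ hst0 hk]
      simp only [List.length_replicate, List.map_replicate, List.reverse_replicate]
      have htn : ((b : Int) ^ L).toNat = b ^ L := by
        rw [show ((b : Int) ^ L) = ((b ^ L : Nat) : Int) by push_cast; ring]
        exact Int.toNat_natCast _
      rw [htn]
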